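-- pv_equiv track=rewrite | github.com/stokuj/Exercises | Data Structures and Algorithms, spring 2026/3 Efficient algorithms/E2 Bit string.py | count_ways2
-- ===== SOURCE A (Python) =====
-- def count_ways2(bits):
--     n = len(bits)
--     result = 0
--     zeros = 0
--     for i in range(n):
--         if bits[i] == '0':
--             zeros += 1
--         if bits[i] == '1':
--             result += zeros
--     return result
-- ===== SOURCE B (Python) =====
-- def count_ways2(bits):
--     # Divide and conquer: solve(s) returns (zeros, ones, pairs) for s;
--     # pairs crossing the split are zeros(left) * ones(right).
--     def solve(s):
--         if len(s) <= 1: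
--             if s == '':
--                 return (0, 0, 0)
--             c = s[0]
--             return (1 if c == '0' else 0, 1 if c == '1' else 0, 0)
--         mid = len(s) // 2
--         z1, o1, p1 = solve(s[:mid])
--         z2, o2, p2 = solve(s[mid:])
--         return (z1 + z2, o1 + o2, p1 + p2 + z1 * o2)
--     return solve(bits)[2]
-- ===== Notes on version B (the rewrite author's own statement) =====
-- stated objective: alternative
-- what changed: B replaces A's single accumulating pass with a divide-and-conquer recursion: it splits the string in half, recursively returns (zeros, ones, pairs) for each half, and combines them, counting cross pairs as zeros(left)*ones(right).
import Mathlib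
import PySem

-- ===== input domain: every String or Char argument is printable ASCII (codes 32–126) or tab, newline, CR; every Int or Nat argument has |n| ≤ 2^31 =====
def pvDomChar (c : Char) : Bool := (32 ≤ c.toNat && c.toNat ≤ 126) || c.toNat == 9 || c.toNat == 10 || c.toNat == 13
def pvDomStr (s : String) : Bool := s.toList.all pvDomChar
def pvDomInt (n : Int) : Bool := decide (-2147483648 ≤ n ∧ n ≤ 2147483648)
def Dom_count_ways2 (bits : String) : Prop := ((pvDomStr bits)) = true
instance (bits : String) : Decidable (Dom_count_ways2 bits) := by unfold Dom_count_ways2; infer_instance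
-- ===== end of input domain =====

-- B replaces A's single accumulating pass by a divide-and-conquer recursion returning
-- (zeros, ones, pairs) per half and combining with zeros(left)*ones(right) cross pairs (alternative decomposition, not faster).


-- ===== PORT A =====
-- literal port of A: single pass, state (result, zeros); zeros is bumped first and the
-- '1' branch then reads the updated zeros, as in the Python
def count_ways2 (bits : String) : Int :=
  (bits.toList.foldl (fun (st : Int × Int) c =>
      let zeros := if c = '0' then st.2 + 1 else st.2
      let result := if c = '1' then st.1 + zeros else st.1
      (result, zeros)) (0, 0)).1

-- ===== PORT B =====
-- port of B's solve: (zeros, ones, pairs) for the list, divide and conquer on halves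
def pvSolve (l : List Char) : Int × Int × Int :=
  if h : l.length ≤ 1 then
    match l with
    | [] => (0, 0, 0)
    | c :: _ => ((if c = '0' then 1 else 0), (if c = '1' then 1 else 0), 0)
  else
    let m := l.length / 2
    let a := pvSolve (l.take m)
    let b := pvSolve (l.drop m)
    (a.1 + b.1, a.2.1 + b.2.1, a.2.2 + b.2.2 + a.1 * b.2.1)
termination_by l.length
decreasing_by
  · simp [List.length_take]; omega
  · simp [List.length_drop]; omega

def count_ways2_alt (bits : String) : Int := (pvSolve bits.toList).2.2

-- ===== PRECONDITION & SPEC =====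
def Spec_count_ways2 (bits : String) (out : Int) : Prop := out = count_ways2_alt bits
instance (bits : String) (out : Int) : Decidable (Spec_count_ways2 bits out) := by unfold Spec_count_ways2; infer_instance

-- ===== CLAIM (what is proved, stated in full; the proofs are below) =====
def Claim_equal_count_ways2 : Prop := ∀ (bits : String), Dom_count_ways2 bits → Spec_count_ways2 bits (count_ways2 bits)

-- ===== LEMMAS AND PROOFS =====

-- number of '0's / '1's and '01' pairs (zero strictly before one), as Int
def pvZeros : List Char → Int
  | [] => 0
  | c :: l => (if c = '0' then 1 else 0) + pvZeros l

def pvOnes : List Char → Int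
  | [] => 0
  | c :: l => (if c = '1' then 1 else 0) + pvOnes l

def pvPairs : List Char → Int
  | [] => 0
  | c :: l => (if c = '0' then pvOnes l else 0) + pvPairs l

theorem pvZeros_append (a b : List Char) : pvZeros (a ++ b) = pvZeros a + pvZeros b := by
  induction a with
  | nil => simp [pvZeros]
  | cons c a ih => simp [pvZeros, ih]; ring

theorem pvOnes_append (a b : List Char) : pvOnes (a ++ b) = pvOnes a + pvOnes b := by
  induction a with
  | nil => simp [pvOnes]
  | cons c a ih => simp [pvOnes, ih]; ring

theorem pvPairs_append (a b : List Char) :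
    pvPairs (a ++ b) = pvPairs a + pvPairs b + pvZeros a * pvOnes b := by
  induction a with
  | nil => simp [pvPairs, pvZeros]
  | cons c a ih =>
    by_cases h : c = '0' <;>
      simp [pvPairs, pvZeros, h, ih, pvOnes_append] <;> ring

-- A's fold computes zeros-so-far and, at each '1', adds them: invariant characterisation
theorem pvFoldA (l : List Char) (r z : Int) :
    l.foldl (fun (st : Int × Int) c =>
      let zeros := if c = '0' then st.2 + 1 else st.2
      let result := if c = '1' then st.1 + zeros else st.1
      (result, zeros)) (r, z) = (r + z * pvOnes l + pvPairs l, z + pvZeros l) := by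
  induction l generalizing r z with
  | nil => simp [pvOnes, pvPairs, pvZeros]
  | cons c l ih =>
    by_cases h0 : c = '0'
    · simp [List.foldl, h0, h0 ▸ (by decide : ¬ ('0' : Char) = '1'), ih, pvOnes, pvPairs, pvZeros]
      and_intros <;> first | trivial | ring
    · by_cases h1 : c = '1'
      · simp [List.foldl, h0, h1, ih, pvOnes, pvPairs, pvZeros]
        and_intros <;> first | trivial | ring
      · simp [List.foldl, h0, h1, ih, pvOnes, pvPairs, pvZeros]

-- B's divide and conquer computes exactly (zeros, ones, pairs); fuel induction on length
theorem pvSolve_eq : ∀ (n : Nat) (l : List Char), l.length ≤ n →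
    pvSolve l = (pvZeros l, pvOnes l, pvPairs l) := by
  intro n
  induction n with
  | zero =>
    intro l h
    have : l = [] := List.eq_nil_of_length_eq_zero (by omega)
    subst this
    simp [pvSolve, pvZeros, pvOnes, pvPairs]
  | succ n ih =>
    intro l h
    rw [pvSolve]
    by_cases hl : l.length ≤ 1
    · simp only [hl, dite_true]
      match l with
      | [] => simp [pvZeros, pvOnes, pvPairs]
      | [c] => simp [pvZeros, pvOnes, pvPairs]
      | _ :: _ :: _ => simp at hl
    · simp only [hl, dite_false]
      have hlen : 2 ≤ l.length := by omega
      have h1 : (l.take (l.length / 2)).length ≤ n := by simp [List.length_take]; omega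
      have h2 : (l.drop (l.length / 2)).length ≤ n := by simp [List.length_drop]; omega
      rw [ih _ h1, ih _ h2]
      have hsplit := List.take_append_drop (l.length / 2) l
      conv_rhs => rw [← hsplit]
      rw [pvZeros_append, pvOnes_append, pvPairs_append]

-- ===== VERDICT (by name: the statement is the Claim_ definition above) =====
theorem count_ways2_spec : Claim_equal_count_ways2 := by
  intro bits _
  unfold Spec_count_ways2 count_ways2 count_ways2_alt
  rw [pvFoldA, pvSolve_eq bits.toList.length bits.toList le_rfl]
  simp
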